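-- pv_equiv track=rewrite | github.com/ahmedkhanrayan7-glitch/ax-data-engine | ax_engine/engines/website/crawler.py | _prioritize_paths
-- ===== SOURCE A (Python) =====
-- from typing import Dict, List, Optional
--
-- def _prioritize_paths(paths: List[str]) -> List[str]:
--     """Sort paths by likelihood of containing DM info."""
--     def priority(p: str) -> int:
--         p_lower = p.lower()
--         for i, keyword in enumerate(["team", "about", "contact", "staff", "leader"]):
--             if keyword in p_lower:
--                 return i
--         return 99
--
--     return sorted(paths, key=priority)
-- ===== SOURCE B (Python) =====
-- from typing import Dict, List, Optional
--
-- _KEYWORDS = ["team", "about", "contact", "staff", "leader"]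
--
-- def _bucket_index(p: str) -> int:
--     pl = p.lower()
--     for i, kw in enumerate(_KEYWORDS):
--         if kw in pl:
--             return i
--     return 5
--
-- def _prioritize_paths(paths: List[str]) -> List[str]:
--     """Stable bucket sort: one pass distributes paths into six priority buckets."""
--     buckets = [[], [], [], [], [], []]
--     for p in paths:
--         buckets[_bucket_index(p)].append(p)
--     out = []
--     for b in buckets:
--         out.extend(b)
--     return out
-- ===== Notes on version B (the rewrite author's own statement) =====
-- stated objective: alternative
-- what changed: Replaces the comparison sort keyed by priority with a single-pass stable bucket sort into six priority buckets concatenated in order.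
import Mathlib
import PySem

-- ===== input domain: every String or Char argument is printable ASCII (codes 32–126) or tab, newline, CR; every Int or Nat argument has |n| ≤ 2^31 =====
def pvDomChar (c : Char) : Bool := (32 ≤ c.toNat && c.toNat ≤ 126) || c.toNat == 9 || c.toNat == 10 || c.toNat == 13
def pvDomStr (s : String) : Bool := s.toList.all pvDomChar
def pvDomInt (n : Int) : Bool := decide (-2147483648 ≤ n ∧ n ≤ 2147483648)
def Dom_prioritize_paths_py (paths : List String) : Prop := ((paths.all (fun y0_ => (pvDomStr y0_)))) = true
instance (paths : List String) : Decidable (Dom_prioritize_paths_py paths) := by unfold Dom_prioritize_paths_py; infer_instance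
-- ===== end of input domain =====

-- B replaces A's comparison sort keyed by priority with a single-pass stable bucket sort (objective: alternative).

-- ===== PORT A =====
-- the enumerated keyword list of A's inner loop
def pvKeywordsA : List (Int × String) :=
  [(0, "team"), (1, "about"), (2, "contact"), (3, "staff"), (4, "leader")]

-- A's inner 'for i, keyword in enumerate(...)' loop with early return
def pvPriLoopA (pl : String) : List (Int × String) → Int
  | [] => 99
  | (i, kw) :: rest => if PySem.Str.isIn kw pl then i else pvPriLoopA pl rest

def pvPriorityA (p : String) : Int :=
  let p_lower := PySem.Str.lower p
  pvPriLoopA p_lower pvKeywordsA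

def prioritize_paths_py (paths : List String) : List String :=
  PySem.List.sorted paths pvPriorityA false

-- ===== PORT B =====
-- B's enumerated keyword list
def pvKeywordsB : List (Nat × String) :=
  [(0, "team"), (1, "about"), (2, "contact"), (3, "staff"), (4, "leader")]

-- B's '_bucket_index' loop: first matching keyword index, else 5
def pvBLoop (pl : String) : List (Nat × String) → Nat
  | [] => 5
  | (i, kw) :: rest => if PySem.Str.isIn kw pl then i else pvBLoop pl rest

def pvBucketIndex (p : String) : Nat :=
  let pl := PySem.Str.lower p
  pvBLoop pl pvKeywordsB

-- the six buckets
structure PvBuckets where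
  b0 : List String
  b1 : List String
  b2 : List String
  b3 : List String
  b4 : List String
  b5 : List String
deriving Repr, DecidableEq

-- buckets[_bucket_index(p)].append(p)
def pvAdd (b : PvBuckets) (p : String) : PvBuckets :=
  match pvBucketIndex p with
  | 0 => { b with b0 := b.b0 ++ [p] }
  | 1 => { b with b1 := b.b1 ++ [p] }
  | 2 => { b with b2 := b.b2 ++ [p] }
  | 3 => { b with b3 := b.b3 ++ [p] }
  | 4 => { b with b4 := b.b4 ++ [p] }
  | _ => { b with b5 := b.b5 ++ [p] }

def prioritize_paths_py_alt (paths : List String) : List String :=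
  let b := paths.foldl pvAdd ⟨[], [], [], [], [], []⟩
  b.b0 ++ b.b1 ++ b.b2 ++ b.b3 ++ b.b4 ++ b.b5

-- ===== PRECONDITION & SPEC =====
def Spec_prioritize_paths_py (paths : List String) (out : List String) : Prop := out = prioritize_paths_py_alt paths
instance (paths : List String) (out : List String) : Decidable (Spec_prioritize_paths_py paths out) := by unfold Spec_prioritize_paths_py; infer_instance

-- ===== CLAIM (what is proved, stated in full; the proofs are below) =====
def Claim_equal_prioritize_paths_py : Prop := ∀ (paths : List String), Dom_prioritize_paths_py paths → Spec_prioritize_paths_py paths (prioritize_paths_py paths)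

-- ===== LEMMAS AND PROOFS =====

-- the priority value of bucket v
def pvVal (v : Nat) : Int := if v = 5 then 99 else (v : Int)

def pvFil (v : Nat) (xs : List String) : List String :=
  xs.filter (fun p => pvBucketIndex p == v)

-- the intended common value: buckets in priority order
def pvF (xs : List String) : List String :=
  pvFil 0 xs ++ pvFil 1 xs ++ pvFil 2 xs ++ pvFil 3 xs ++ pvFil 4 xs ++ pvFil 5 xs

theorem pvBucketIndex_le (p : String) : pvBucketIndex p ≤ 5 := by
  simp only [pvBucketIndex, pvKeywordsB, pvBLoop]
  split_ifs <;> simp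

theorem pvPriorityA_eq (p : String) : pvPriorityA p = pvVal (pvBucketIndex p) := by
  simp only [pvPriorityA, pvBucketIndex, pvKeywordsA, pvKeywordsB, pvPriLoopA, pvBLoop, pvVal]
  split_ifs <;> simp_all

theorem pvVal_lt_iff {a b : Nat} (ha : a ≤ 5) (hb : b ≤ 5) : (pvVal a < pvVal b) ↔ a < b := by
  interval_cases a <;> interval_cases b <;> simp [pvVal]

theorem pvFil_append_singleton (v : Nat) (ys : List String) (x : String) :
    pvFil v (ys ++ [x]) = pvFil v ys ++ (if pvBucketIndex x = v then [x] else []) := by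
  simp [pvFil, List.filter_append]
  split_ifs <;> simp_all

theorem pvBucketIndex_of_mem_fil {v : Nat} {xs : List String} {y : String}
    (h : y ∈ pvFil v xs) : pvBucketIndex y = v := by
  simp [pvFil, List.mem_filter] at h
  exact h.2

theorem insertBy_append_of_not_before {α : Type} (before : α → α → Bool) (x : α)
    (L1 L2 : List α) (h : ∀ y ∈ L1, before x y = false) :
    PySem.List.insertBy before x (L1 ++ L2) = L1 ++ PySem.List.insertBy before x L2 := by
  induction L1 with
  | nil => simp
  | cons y ys ih =>
    have hy : before x y = false := h y (by simp)
    simp [PySem.List.insertBy, hy]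
    exact ih (fun z hz => h z (by simp [hz]))

theorem insertBy_of_forall_before {α : Type} (before : α → α → Bool) (x : α)
    (L : List α) (h : ∀ y ∈ L, before x y = true) :
    PySem.List.insertBy before x L = x :: L := by
  cases L with
  | nil => simp [PySem.List.insertBy]
  | cons y ys => simp [PySem.List.insertBy, h y (by simp)]

-- B's fold computes the buckets as filters of the input
theorem foldl_pvAdd (xs : List String) (b : PvBuckets) :
    xs.foldl pvAdd b =
      ⟨b.b0 ++ pvFil 0 xs, b.b1 ++ pvFil 1 xs, b.b2 ++ pvFil 2 xs,
       b.b3 ++ pvFil 3 xs, b.b4 ++ pvFil 4 xs, b.b5 ++ pvFil 5 xs⟩ := by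
  induction xs generalizing b with
  | nil => simp [pvFil]
  | cons x xs ih =>
    have hle := pvBucketIndex_le x
    rw [List.foldl_cons, ih]
    have hf : ∀ v : Nat, pvFil v (x :: xs) =
        (if pvBucketIndex x = v then [x] else []) ++ pvFil v xs := by
      intro v
      simp [pvFil, List.filter_cons]
      split_ifs with h <;> simp
    interval_cases h : pvBucketIndex x <;>
      simp [pvAdd, h, hf, List.append_assoc]

theorem alt_eq_pvF (xs : List String) : prioritize_paths_py_alt xs = pvF xs := by
  unfold prioritize_paths_py_alt pvF
  rw [foldl_pvAdd]
  simp

-- A's stable sort also computes the bucket concatenation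
theorem sorted_eq_pvF (xs : List String) :
    PySem.List.sorted xs pvPriorityA false = pvF xs := by
  induction xs using List.reverseRecOn with
  | nil => simp [PySem.List.sorted_eq_foldl_insertBy, pvF, pvFil]
  | append_singleton ys x ih =>
    rw [PySem.List.sorted_eq_foldl_insertBy, List.foldl_append,
        ← PySem.List.sorted_eq_foldl_insertBy, ih]
    simp only [List.foldl_cons, List.foldl_nil]
    have hle := pvBucketIndex_le x
    have hbef : ∀ y : String,
        (decide (pvPriorityA x < pvPriorityA y)) = decide (pvBucketIndex x < pvBucketIndex y) := by
      intro y
      rw [pvPriorityA_eq, pvPriorityA_eq]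
      simp [pvVal_lt_iff (pvBucketIndex_le x) (pvBucketIndex_le y)]
    have key : ∀ (L1 L2 : List String),
        (∀ y ∈ L1, pvBucketIndex y ≤ pvBucketIndex x) →
        (∀ y ∈ L2, pvBucketIndex x < pvBucketIndex y) →
        PySem.List.insertBy (fun a b => decide (pvPriorityA a < pvPriorityA b)) x (L1 ++ L2) =
          L1 ++ [x] ++ L2 := by
      intro L1 L2 h1 h2
      rw [insertBy_append_of_not_before _ _ _ _ (fun y hy => by
        rw [hbef y]; simp; exact h1 y hy)]
      cases L2 with
      | nil => simp [PySem.List.insertBy]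
      | cons z zs =>
        rw [insertBy_of_forall_before _ _ _ (fun y hy => by
          rw [hbef y]; simp; exact h2 y hy)]
        simp
    unfold pvF
    interval_cases h : pvBucketIndex x
    · rw [show pvFil 0 ys ++ pvFil 1 ys ++ pvFil 2 ys ++ pvFil 3 ys ++ pvFil 4 ys ++ pvFil 5 ys = (pvFil 0 ys) ++ (pvFil 1 ys ++ pvFil 2 ys ++ pvFil 3 ys ++ pvFil 4 ys ++ pvFil 5 ys) by simp [List.append_assoc]]
      rw [key (pvFil 0 ys) (pvFil 1 ys ++ pvFil 2 ys ++ pvFil 3 ys ++ pvFil 4 ys ++ pvFil 5 ys) ?_ ?_]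
      · simp [pvFil_append_singleton, h, List.append_assoc]
      · intro y hy
        all_goals (have := pvBucketIndex_of_mem_fil hy; omega)
      · intro y hy
        simp only [List.mem_append, or_assoc] at hy
        rcases hy with hy|hy|hy|hy|hy
        all_goals (have := pvBucketIndex_of_mem_fil hy; omega)
    · rw [show pvFil 0 ys ++ pvFil 1 ys ++ pvFil 2 ys ++ pvFil 3 ys ++ pvFil 4 ys ++ pvFil 5 ys = (pvFil 0 ys ++ pvFil 1 ys) ++ (pvFil 2 ys ++ pvFil 3 ys ++ pvFil 4 ys ++ pvFil 5 ys) by simp [List.append_assoc]]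
      rw [key (pvFil 0 ys ++ pvFil 1 ys) (pvFil 2 ys ++ pvFil 3 ys ++ pvFil 4 ys ++ pvFil 5 ys) ?_ ?_]
      · simp [pvFil_append_singleton, h, List.append_assoc]
      · intro y hy
        simp only [List.mem_append] at hy
        rcases hy with hy|hy
        all_goals (have := pvBucketIndex_of_mem_fil hy; omega)
      · intro y hy
        simp only [List.mem_append, or_assoc] at hy
        rcases hy with hy|hy|hy|hy
        all_goals (have := pvBucketIndex_of_mem_fil hy; omega)
    · rw [show pvFil 0 ys ++ pvFil 1 ys ++ pvFil 2 ys ++ pvFil 3 ys ++ pvFil 4 ys ++ pvFil 5 ys = (pvFil 0 ys ++ pvFil 1 ys ++ pvFil 2 ys) ++ (pvFil 3 ys ++ pvFil 4 ys ++ pvFil 5 ys) by simp [List.append_assoc]]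
      rw [key (pvFil 0 ys ++ pvFil 1 ys ++ pvFil 2 ys) (pvFil 3 ys ++ pvFil 4 ys ++ pvFil 5 ys) ?_ ?_]
      · simp [pvFil_append_singleton, h, List.append_assoc]
      · intro y hy
        simp only [List.mem_append, or_assoc] at hy
        rcases hy with hy|hy|hy
        all_goals (have := pvBucketIndex_of_mem_fil hy; omega)
      · intro y hy
        simp only [List.mem_append, or_assoc] at hy
        rcases hy with hy|hy|hy
        all_goals (have := pvBucketIndex_of_mem_fil hy; omega)
    · rw [show pvFil 0 ys ++ pvFil 1 ys ++ pvFil 2 ys ++ pvFil 3 ys ++ pvFil 4 ys ++ pvFil 5 ys = (pvFil 0 ys ++ pvFil 1 ys ++ pvFil 2 ys ++ pvFil 3 ys) ++ (pvFil 4 ys ++ pvFil 5 ys) by simp [List.append_assoc]]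
      rw [key (pvFil 0 ys ++ pvFil 1 ys ++ pvFil 2 ys ++ pvFil 3 ys) (pvFil 4 ys ++ pvFil 5 ys) ?_ ?_]
      · simp [pvFil_append_singleton, h, List.append_assoc]
      · intro y hy
        simp only [List.mem_append, or_assoc] at hy
        rcases hy with hy|hy|hy|hy
        all_goals (have := pvBucketIndex_of_mem_fil hy; omega)
      · intro y hy
        simp only [List.mem_append] at hy
        rcases hy with hy|hy
        all_goals (have := pvBucketIndex_of_mem_fil hy; omega)
    · rw [show pvFil 0 ys ++ pvFil 1 ys ++ pvFil 2 ys ++ pvFil 3 ys ++ pvFil 4 ys ++ pvFil 5 ys = (pvFil 0 ys ++ pvFil 1 ys ++ pvFil 2 ys ++ pvFil 3 ys ++ pvFil 4 ys) ++ (pvFil 5 ys) by simp [List.append_assoc]]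
      rw [key (pvFil 0 ys ++ pvFil 1 ys ++ pvFil 2 ys ++ pvFil 3 ys ++ pvFil 4 ys) (pvFil 5 ys) ?_ ?_]
      · simp [pvFil_append_singleton, h, List.append_assoc]
      · intro y hy
        simp only [List.mem_append, or_assoc] at hy
        rcases hy with hy|hy|hy|hy|hy
        all_goals (have := pvBucketIndex_of_mem_fil hy; omega)
      · intro y hy
        all_goals (have := pvBucketIndex_of_mem_fil hy; omega)
    · rw [show pvFil 0 ys ++ pvFil 1 ys ++ pvFil 2 ys ++ pvFil 3 ys ++ pvFil 4 ys ++ pvFil 5 ys = (pvFil 0 ys ++ pvFil 1 ys ++ pvFil 2 ys ++ pvFil 3 ys ++ pvFil 4 ys ++ pvFil 5 ys) ++ (([] : List String)) by simp [List.append_assoc]]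
      rw [key (pvFil 0 ys ++ pvFil 1 ys ++ pvFil 2 ys ++ pvFil 3 ys ++ pvFil 4 ys ++ pvFil 5 ys) (([] : List String)) ?_ ?_]
      · simp [pvFil_append_singleton, h, List.append_assoc]
      · intro y hy
        simp only [List.mem_append, or_assoc] at hy
        rcases hy with hy|hy|hy|hy|hy|hy
        all_goals (have := pvBucketIndex_of_mem_fil hy; omega)
      · intro y hy
        simp at hy

-- ===== VERDICT (by name: the statement is the Claim_ definition above) =====
theorem prioritize_paths_py_spec : Claim_equal_prioritize_paths_py := by
  intro paths _
  unfold Spec_prioritize_paths_py prioritize_paths_py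
  rw [alt_eq_pvF, sorted_eq_pvF]
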